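-- pv_equiv track=rewrite | github.com/SabaBok/GOA_HW | GOA Academy/Level051/HW/HW1.py | number_of_duplicate_digits
-- ===== SOURCE A (Python) =====
-- def number_of_duplicate_digits(ndigit):
--     def dp(pos, isDouble, lastDigit):
--         if pos == ndigit:
--             return 1 if isDouble else 0
--
--         if (pos, isDouble, lastDigit) in memo:
--             return memo[(pos, isDouble, lastDigit)]
--
--         start = 1 if pos == 0 else 0
--         result = 0
--         for digit in range(start, 10):
--             result += dp(
--                 pos + 1,
--                 isDouble or (digit == lastDigit),
--                 digit
--             )
--
--         memo[(pos, isDouble, lastDigit)] = result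
--         return result
--
--     memo = {}
--     return dp(0, 0, -1)
-- ===== SOURCE B (Python) =====
-- def number_of_duplicate_digits(ndigit):
--     # Closed form: among the 9*10^(n-1) n-digit numbers, 9*9^(n-1) have no
--     # adjacent equal digits, so the answer is their difference.
--     if ndigit < 1:
--         return 0
--     return 9 * (10 ** (ndigit - 1) - 9 ** (ndigit - 1))
-- ===== Notes on version B (the rewrite author's own statement) =====
-- stated objective: faster
-- what changed: Replaced the memoized digit-DP recursion with the closed-form count 9*(10^(n-1) - 9^(n-1)) (total minus no-adjacent-duplicate n-digit numbers), returning 0 for n < 1.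
import Mathlib
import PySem

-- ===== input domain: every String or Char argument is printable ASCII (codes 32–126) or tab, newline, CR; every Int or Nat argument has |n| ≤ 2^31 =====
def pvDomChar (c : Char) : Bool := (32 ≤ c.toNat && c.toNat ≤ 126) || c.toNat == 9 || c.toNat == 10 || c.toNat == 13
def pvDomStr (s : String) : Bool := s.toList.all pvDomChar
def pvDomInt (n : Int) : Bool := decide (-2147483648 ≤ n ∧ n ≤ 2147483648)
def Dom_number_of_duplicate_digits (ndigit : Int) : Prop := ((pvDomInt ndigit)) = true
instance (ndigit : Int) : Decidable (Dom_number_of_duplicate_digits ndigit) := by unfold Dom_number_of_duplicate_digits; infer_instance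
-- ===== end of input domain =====

-- B replaces A's memoized digit-DP recursion by the closed form 9*(10^(n-1) - 9^(n-1)) (objective: faster).

-- ===== PORT A =====
-- Literal port of A's inner `dp`: the memo dict is threaded through; `fuel` is the number of
-- remaining recursion levels (ndigit - pos), exact wherever Python's recursion terminates
-- (it diverges for ndigit < 0, excluded by Pre_). isDouble is Bool (Python's initial 0 and
-- False are the same dict key and the same truth value here); the memo dict is a hash map,
-- as Python's dict is.
def dpA (ndigit : Int) : Nat → Int → Bool → Int → Std.HashMap (Int × Bool × Int) Int →
    Int × Std.HashMap (Int × Bool × Int) Int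
  | fuel, pos, isDouble, lastDigit, memo =>
    if pos = ndigit then ((if isDouble then 1 else 0), memo)
    else
      match memo.get? (pos, isDouble, lastDigit) with
      | some v => (v, memo)
      | none =>
        match fuel with
        | 0 => (0, memo)  -- fuel exhausted; unreachable when 0 ≤ ndigit and fuel = ndigit - pos
        | f + 1 =>
          let start : Int := if pos = 0 then 1 else 0
          let rm := (PySem.List.pyRange start 10 1).foldl
            (fun (acc : Int × Std.HashMap (Int × Bool × Int) Int) digit =>
              let p := dpA ndigit f (pos + 1) (isDouble || (digit == lastDigit)) digit acc.2
              (acc.1 + p.1, p.2)) (0, memo)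
          (rm.1, rm.2.insert (pos, isDouble, lastDigit) rm.1)

def number_of_duplicate_digits (ndigit : Int) : Int :=
  (dpA ndigit ndigit.toNat 0 false (-1) ∅).1

-- ===== PORT B =====
def number_of_duplicate_digits_alt (ndigit : Int) : Int :=
  if ndigit < 1 then 0
  else 9 * ((10 : Int) ^ (ndigit - 1).toNat - (9 : Int) ^ (ndigit - 1).toNat)

-- ===== PRECONDITION & SPEC =====
-- Pre_ excludes ndigit < 0, on which A's recursion never reaches pos == ndigit and raises RecursionError.
def Pre_number_of_duplicate_digits (ndigit : Int) : Prop := 0 ≤ ndigit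
instance (ndigit : Int) : Decidable (Pre_number_of_duplicate_digits ndigit) := by
  unfold Pre_number_of_duplicate_digits; infer_instance
def pvWitness_number_of_duplicate_digits : Int := 3

def Spec_number_of_duplicate_digits (ndigit : Int) (out : Int) : Prop :=
  out = number_of_duplicate_digits_alt ndigit
instance (ndigit : Int) (out : Int) : Decidable (Spec_number_of_duplicate_digits ndigit out) := by
  unfold Spec_number_of_duplicate_digits; infer_instance

-- ===== CLAIM (what is proved, stated in full; the proofs are below) =====
def Claim_equal_number_of_duplicate_digits : Prop := ∀ (ndigit : Int), Dom_number_of_duplicate_digits ndigit → Pre_number_of_duplicate_digits ndigit → Spec_number_of_duplicate_digits ndigit (number_of_duplicate_digits ndigit)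

-- ===== LEMMAS AND PROOFS =====

-- Pure (memo-free) model of A's dp, same fuel discipline.
def dpPure (ndigit : Int) : Nat → Int → Bool → Int → Int
  | fuel, pos, isDouble, lastDigit =>
    if pos = ndigit then (if isDouble then 1 else 0)
    else
      match fuel with
      | 0 => 0
      | f + 1 =>
        let start : Int := if pos = 0 then 1 else 0
        (PySem.List.pyRange start 10 1).foldl
          (fun acc digit => acc + dpPure ndigit f (pos + 1) (isDouble || (digit == lastDigit)) digit) 0

-- memo invariant: every stored value is the pure dp value at the matching fuel
def GoodMemo (ndigit : Int) (memo : Std.HashMap (Int × Bool × Int) Int) : Prop :=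
  ∀ p b d v, memo.get? (p, b, d) = some v → v = dpPure ndigit ((ndigit - p).toNat) p b d

lemma hmGet?Insert (m : Std.HashMap (Int × Bool × Int) Int) (k k' : Int × Bool × Int) (v : Int) :
    (m.insert k v).get? k' = if k' = k then some v else m.get? k' := by
  by_cases h : k' = k
  · subst h; simp [Std.HashMap.get?_eq_getElem?]
  · simp [Std.HashMap.get?_eq_getElem?, Std.HashMap.getElem?_insert, h, Ne.symm h]

lemma dpA_eq_dpPure (ndigit : Int) :
    ∀ fuel pos b d memo, pos ≤ ndigit → fuel = (ndigit - pos).toNat → GoodMemo ndigit memo →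
      (dpA ndigit fuel pos b d memo).1 = dpPure ndigit fuel pos b d ∧
      GoodMemo ndigit (dpA ndigit fuel pos b d memo).2 := by
  intro fuel
  induction fuel with
  | zero =>
    intro pos b d memo hle hfuel hgood
    have hpos : pos = ndigit := by omega
    simp [dpA, dpPure, hpos, hgood]
  | succ f ih =>
    intro pos b d memo hle hfuel hgood
    have hne : pos ≠ ndigit := by omega
    rw [dpA]
    simp only [if_neg hne]
    cases hmv : memo.get? (pos, b, d) with
    | some v =>
      dsimp only
      refine ⟨?_, hgood⟩
      have hv := hgood pos b d v hmv
      rw [hfuel]; exact hv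
    | none =>
      dsimp only
      conv_lhs => rw [dpPure]
      simp only [if_neg hne]
      have key : ∀ (L : List Int) (acc : Int) (m : Std.HashMap (Int × Bool × Int) Int),
          GoodMemo ndigit m →
          (L.foldl (fun (a : Int × Std.HashMap (Int × Bool × Int) Int) digit =>
              (a.1 + (dpA ndigit f (pos + 1) (b || (digit == d)) digit a.2).1,
               (dpA ndigit f (pos + 1) (b || (digit == d)) digit a.2).2)) (acc, m)).1
            = L.foldl (fun a digit => a + dpPure ndigit f (pos + 1) (b || (digit == d)) digit) acc ∧
          GoodMemo ndigit (L.foldl (fun (a : Int × Std.HashMap (Int × Bool × Int) Int) digit =>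
              (a.1 + (dpA ndigit f (pos + 1) (b || (digit == d)) digit a.2).1,
               (dpA ndigit f (pos + 1) (b || (digit == d)) digit a.2).2)) (acc, m)).2 := by
        intro L
        induction L with
        | nil => intro acc m hm; exact ⟨rfl, hm⟩
        | cons x xs ihL =>
          intro acc m hm
          have hx := ih (pos + 1) (b || (x == d)) x m (by omega) (by omega) hm
          simp only [List.foldl_cons]
          rw [hx.1]
          exact ihL _ _ hx.2
      have hk := key (PySem.List.pyRange (if pos = 0 then (1:Int) else 0) 10 1) 0 memo hgood
      refine ⟨?_, ?_⟩
      · exact hk.1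
      intro p' b' d' v hv
      rw [hmGet?Insert] at hv
      by_cases hcase : ((p', b', d') : Int × Bool × Int) = (pos, b, d)
      · rw [if_pos hcase] at hv
        injection hcase with h1 h23
        injection h23 with h2 h3
        subst h1; subst h2; subst h3
        have hv' := Option.some.inj hv
        rw [← hv', hk.1, ← hfuel, dpPure]
        simp only [if_neg hne]
      · rw [if_neg hcase] at hv
        exact hk.2 p' b' d' v hv

lemma dpPure_vals (n : Int) :
    ∀ fuel pos, 1 ≤ pos → pos ≤ n → fuel = (n - pos).toNat →
      (∀ d : Int, dpPure n fuel pos true d = 10 ^ fuel) ∧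
      (∀ d : Int, 0 ≤ d → d < 10 → dpPure n fuel pos false d = 10 ^ fuel - 9 ^ fuel) := by
  intro fuel
  induction fuel with
  | zero =>
    intro pos h1 h2 hf
    have hpos : pos = n := by omega
    constructor <;> intro d <;> simp [dpPure, hpos]
  | succ f ih =>
    intro pos h1 h2 hf
    have hne : pos ≠ n := by omega
    have hp0 : pos ≠ 0 := by omega
    have hih := ih (pos + 1) (by omega) (by omega) (by omega)
    have hr : PySem.List.pyRange (0:Int) 10 1 = [0,1,2,3,4,5,6,7,8,9] := by decide
    constructor
    · intro d
      rw [dpPure]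
      simp only [if_neg hne, if_neg hp0, hr, List.foldl, Bool.true_or]
      rw [hih.1 0, hih.1 1, hih.1 2, hih.1 3, hih.1 4, hih.1 5, hih.1 6, hih.1 7, hih.1 8, hih.1 9]
      rw [pow_succ]; ring
    · intro d hd0 hd10
      rw [dpPure]
      simp only [if_neg hne, if_neg hp0, hr, List.foldl, Bool.false_or]
      interval_cases d <;>
        simp only [show ∀ (i j : Int), (i == j) = decide (i = j) from fun _ _ => rfl] <;>
        norm_num <;>
        rw [hih.1] <;>
        (try rw [hih.2 0 (by norm_num) (by norm_num)]) <;>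
        (try rw [hih.2 1 (by norm_num) (by norm_num)]) <;>
        (try rw [hih.2 2 (by norm_num) (by norm_num)]) <;>
        (try rw [hih.2 3 (by norm_num) (by norm_num)]) <;>
        (try rw [hih.2 4 (by norm_num) (by norm_num)]) <;>
        (try rw [hih.2 5 (by norm_num) (by norm_num)]) <;>
        (try rw [hih.2 6 (by norm_num) (by norm_num)]) <;>
        (try rw [hih.2 7 (by norm_num) (by norm_num)]) <;>
        (try rw [hih.2 8 (by norm_num) (by norm_num)]) <;>
        (try rw [hih.2 9 (by norm_num) (by norm_num)]) <;>
        (rw [pow_succ, pow_succ]; ring)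

-- ===== VERDICT (by name: the statement is the Claim_ definition above) =====
theorem number_of_duplicate_digits_spec : Claim_equal_number_of_duplicate_digits := by
  intro n _ hpre
  have hpre' : (0 : Int) ≤ n := hpre
  unfold Spec_number_of_duplicate_digits number_of_duplicate_digits number_of_duplicate_digits_alt
  have hgood : GoodMemo n ∅ := by
    intro p b d v hv; simp [Std.HashMap.get?_eq_getElem?] at hv
  have hA := dpA_eq_dpPure n n.toNat 0 false (-1) ∅ hpre' (by omega) hgood
  rw [hA.1]
  by_cases hn : n < 1
  · have hn0 : n = 0 := by omega
    subst hn0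
    simp [dpPure]
  · have hne : (0 : Int) ≠ n := by omega
    have hk : n.toNat = (n - 1).toNat + 1 := by omega
    rw [if_neg hn, hk, dpPure]
    generalize hgen : (n - 1).toNat = k
    have hih := dpPure_vals n k 1 (by omega) (by omega) hgen.symm
    have hr : PySem.List.pyRange (1:Int) 10 1 = [1,2,3,4,5,6,7,8,9] := by decide
    simp only [if_neg hne, reduceIte, hr, List.foldl, Bool.false_or, zero_add,
      show ((1:Int) == (-1:Int)) = false from rfl, show ((2:Int) == (-1:Int)) = false from rfl,
      show ((3:Int) == (-1:Int)) = false from rfl, show ((4:Int) == (-1:Int)) = false from rfl,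
      show ((5:Int) == (-1:Int)) = false from rfl, show ((6:Int) == (-1:Int)) = false from rfl,
      show ((7:Int) == (-1:Int)) = false from rfl, show ((8:Int) == (-1:Int)) = false from rfl,
      show ((9:Int) == (-1:Int)) = false from rfl]
    rw [hih.2 1 (by norm_num) (by norm_num), hih.2 2 (by norm_num) (by norm_num),
        hih.2 3 (by norm_num) (by norm_num), hih.2 4 (by norm_num) (by norm_num),
        hih.2 5 (by norm_num) (by norm_num), hih.2 6 (by norm_num) (by norm_num),
        hih.2 7 (by norm_num) (by norm_num), hih.2 8 (by norm_num) (by norm_num),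
        hih.2 9 (by norm_num) (by norm_num)]
    ring
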